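-- pv_equiv track=rewrite | github.com/devZUO87/tl_tools | TlTools/data/data_oop.py | group_by_type
-- ===== SOURCE A (Python) =====
-- def group_by_type(s):
--     if not s:
--         return ""
--
--     groups = []
--     current_group = s[0]
--
--     def char_type(c):
--         if c.isdigit():
--             return 'digit'
--         elif c.isalpha():
--             return 'alpha'
--         else:
--             return 'symbol'
--
--     for i in range(1, len(s)):
--         if char_type(s[i]) == char_type(current_group[-1]):
--             current_group += s[i]
--         else:
--             groups.append(current_group)
--             current_group = s[i]
--
--     groups.append(current_group)
--     return groups[0] + groups[1]
-- ===== SOURCE B (Python) =====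
-- def group_by_type(s):
--     if not s:
--         return ""
--
--     def char_type(c):
--         if c.isdigit():
--             return 'digit'
--         elif c.isalpha():
--             return 'alpha'
--         else:
--             return 'symbol'
--
--     # scan only the first two runs and return that prefix of s
--     n = len(s)
--     i = 1
--     while i < n and char_type(s[i]) == char_type(s[0]):
--         i += 1
--     j = i + 1
--     while j < n and char_type(s[j]) == char_type(s[i]):
--         j += 1
--     return s[:j]
-- ===== Notes on version B (the rewrite author's own statement) =====
-- stated objective: alternative
-- what changed: Instead of folding the whole string into a list of runs and concatenating the first two, B scans forward only to the end of the second run and returns that prefix of s, touching no characters past it and building no group list; on single-run strings, where A raises IndexError, B naturally returns the whole string (excluded by Pre_).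
import Mathlib
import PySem

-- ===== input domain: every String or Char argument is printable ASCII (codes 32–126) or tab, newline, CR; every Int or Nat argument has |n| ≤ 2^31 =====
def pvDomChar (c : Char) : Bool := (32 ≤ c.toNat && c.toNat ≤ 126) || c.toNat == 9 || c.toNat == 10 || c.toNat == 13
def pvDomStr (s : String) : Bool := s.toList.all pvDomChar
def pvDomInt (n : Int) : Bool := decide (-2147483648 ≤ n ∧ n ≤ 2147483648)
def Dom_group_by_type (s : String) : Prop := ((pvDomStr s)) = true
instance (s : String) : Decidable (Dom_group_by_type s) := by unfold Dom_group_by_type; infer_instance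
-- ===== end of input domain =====

-- B scans only to the end of the second run and returns that prefix of s (no group list is built); A folds the whole string into runs.


-- ===== PORT A =====
-- char_type(c): 'digit' / 'alpha' / 'symbol' encoded as 0 / 1 / 2 (the helper both Pythons share)
def pvCharType (c : Char) : Nat :=
  if PySem.Chars.isdigit c then 0 else if PySem.Chars.isalpha c then 1 else 2

-- one iteration of A's for-loop; current_group[-1] is p.2.getLast! (current_group is never empty)
def pvStepA (p : List (List Char) × List Char) (ch : Char) : List (List Char) × List Char :=
  if pvCharType ch = pvCharType p.2.getLast! then (p.1, p.2 ++ [ch]) else (p.1 ++ [p.2], [ch])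

def group_by_type (s : String) : String :=
  match s.toList with
  | [] => ""
  | c :: rest =>
      let st := rest.foldl pvStepA ([], [c])
      let groups := st.1 ++ [st.2]
      -- groups[1] raises IndexError in Python when only one group exists; Pre_ excludes that, so getD [] is never read under Pre_
      String.ofList (groups.getD 0 [] ++ groups.getD 1 [])

-- ===== PORT B =====
-- while i < n and char_type(s[i]) == t: i += 1   (first index ≥ i whose char is not of type t, or n)
def pvScan (l : List Char) (t : Nat) (i : Nat) : Nat :=
  if h : i < l.length then
    if pvCharType l[i] = t then pvScan l t (i + 1) else i
  else i
termination_by l.length - i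

def group_by_type_alt (s : String) : String :=
  match s.toList with
  | [] => ""
  | c :: _ =>
      let l := s.toList
      let i := pvScan l (pvCharType c) 1
      let j := if h : i < l.length then pvScan l (pvCharType (l[i]'h)) (i + 1) else i + 1
      String.ofList (l.take j)   -- s[:j]

-- ===== PRECONDITION & SPEC =====
-- Pre_ excludes nonempty strings whose characters all share one type: there Python A raises IndexError (groups[1]).
def Pre_group_by_type (s : String) : Prop :=
  s.toList = [] ∨ s.toList.any (fun c => pvCharType c ≠ pvCharType s.toList.headI) = true
instance (s : String) : Decidable (Pre_group_by_type s) := by unfold Pre_group_by_type; infer_instance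
def pvWitness_group_by_type : String := "ab1"

def Spec_group_by_type (s : String) (out : String) : Prop := out = group_by_type_alt s
instance (s : String) (out : String) : Decidable (Spec_group_by_type s out) := by unfold Spec_group_by_type; infer_instance

-- ===== CLAIM (what is proved, stated in full; the proofs are below) =====
def Claim_equal_group_by_type : Prop := ∀ (s : String), Dom_group_by_type s → Pre_group_by_type s → Spec_group_by_type s (group_by_type s)

-- ===== LEMMAS AND PROOFS =====

-- proof-side list of runs of equal char type
def pvRuns : List Char → List (List Char)
  | [] => []
  | c :: rest =>
      (c :: rest.takeWhile (fun x => pvCharType x = pvCharType c)) ::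
        pvRuns (rest.dropWhile (fun x => pvCharType x = pvCharType c))
termination_by l => l.length
decreasing_by
  exact Nat.lt_succ_of_le (List.length_dropWhile_le _ _)

lemma pvRuns_cons (c : Char) (rest : List Char) :
    pvRuns (c :: rest) =
      (c :: rest.takeWhile (fun x => pvCharType x = pvCharType c)) ::
        pvRuns (rest.dropWhile (fun x => pvCharType x = pvCharType c)) := by rw [pvRuns]

lemma foldA_runs (rest : List Char) : ∀ (acc : List (List Char)) (cur : List Char) (t : Nat),
    cur ≠ [] → (∀ x ∈ cur, pvCharType x = t) →
    (rest.foldl pvStepA (acc, cur)).1 ++ [(rest.foldl pvStepA (acc, cur)).2] =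
      acc ++ ((cur ++ rest.takeWhile (fun x => pvCharType x = t)) ::
        pvRuns (rest.dropWhile (fun x => pvCharType x = t))) := by
  induction rest with
  | nil => intro acc cur t hne hu; simp [pvRuns]
  | cons ch rest ih =>
      intro acc cur t hne hu
      have hlast : pvCharType (cur.getLast hne) = t := hu _ (List.getLast_mem hne)
      have hlast? : pvCharType (cur.getLast?.getD 'A') = t := by
        rw [List.getLast?_eq_some_getLast hne]; exact hlast
      by_cases hp : pvCharType ch = t
      · have hstep : pvStepA (acc, cur) ch = (acc, cur ++ [ch]) := by
          simp [pvStepA, hlast?, hp]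
        rw [List.foldl_cons, hstep,
          ih acc (cur ++ [ch]) t (by simp) (by
            intro x hx
            rcases List.mem_append.1 hx with h | h
            · exact hu x h
            · simp at h; subst h; exact hp)]
        simp [hp]
      · have hstep : pvStepA (acc, cur) ch = (acc ++ [cur], [ch]) := by
          simp [pvStepA, hlast?, hp]
        rw [List.foldl_cons, hstep,
          ih (acc ++ [cur]) [ch] (pvCharType ch) (by simp) (by simp)]
        simp [hp, pvRuns_cons]

lemma pvScan_eq (l : List Char) (t : Nat) : ∀ i : Nat,
    pvScan l t i = i + ((l.drop i).takeWhile (fun x => pvCharType x = t)).length := by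
  intro i
  induction hn : l.length - i using Nat.strong_induction_on generalizing i with
  | _ n ih =>
    rw [pvScan]
    by_cases h : i < l.length
    · rw [dif_pos h]
      have hdrop : l.drop i = l[i] :: l.drop (i + 1) := List.drop_eq_getElem_cons h
      rw [hdrop]
      by_cases hp : pvCharType l[i] = t
      · rw [if_pos hp, ih (l.length - (i + 1)) (by omega) (i + 1) rfl,
          List.takeWhile_cons, if_pos (by simpa using hp)]
        simp; omega
      · rw [if_neg hp, List.takeWhile_cons, if_neg (by simpa using hp)]
        simp
    · rw [dif_neg h, List.drop_eq_nil_of_le (by omega)]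
      simp

-- the shared shape once the string is split as c :: r1 ++ d :: rest2 with r1 all of c's type and d of a different type
lemma core_eq (c d : Char) (r1 rest2 : List Char)
    (h1 : ∀ x ∈ r1, pvCharType x = pvCharType c)
    (h2 : pvCharType d ≠ pvCharType c) :
    (let st := (r1 ++ d :: rest2).foldl pvStepA ([], [c])
     let groups := st.1 ++ [st.2]
     groups.getD 0 [] ++ groups.getD 1 []) =
    (let l := c :: (r1 ++ d :: rest2)
     let i := pvScan l (pvCharType c) 1
     let j := if h : i < l.length then pvScan l (pvCharType (l[i]'h)) (i + 1) else i + 1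
     l.take j) := by
  have hptw : (r1 ++ d :: rest2).takeWhile (fun x => pvCharType x = pvCharType c) = r1 := by
    rw [List.takeWhile_append_of_pos (by simpa using h1), List.takeWhile_cons,
      if_neg (by simpa using h2)]
    simp
  have hpdw : (r1 ++ d :: rest2).dropWhile (fun x => pvCharType x = pvCharType c) = d :: rest2 := by
    have h' := List.takeWhile_append_dropWhile
      (p := fun x => decide (pvCharType x = pvCharType c)) (l := r1 ++ d :: rest2)
    rw [hptw] at h'
    exact List.append_cancel_left h'
  -- A side
  have hfold := foldA_runs (r1 ++ d :: rest2) [] [c] (pvCharType c) (by simp) (by simp)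
  rw [hptw, hpdw] at hfold
  -- B side: first scan stops right after r1, second right after the run of d's
  have hi : pvScan (c :: (r1 ++ d :: rest2)) (pvCharType c) 1 = 1 + r1.length := by
    rw [pvScan_eq]
    simp only [List.drop_succ_cons, List.drop_zero, hptw]
  have hilt : 1 + r1.length < (c :: (r1 ++ d :: rest2)).length := by simp; omega
  have hget : (c :: (r1 ++ d :: rest2))[1 + r1.length]'hilt = d :=
    List.getElem_of_append (l₁ := c :: r1) (l₂ := rest2) rfl (by simp [Nat.add_comm])
  have hj : pvScan (c :: (r1 ++ d :: rest2)) (pvCharType d) (1 + r1.length + 1) =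
      1 + r1.length + 1 +
        (rest2.takeWhile (fun x => pvCharType x = pvCharType d)).length := by
    rw [pvScan_eq]
    have hdrop : (c :: (r1 ++ d :: rest2)).drop (1 + r1.length + 1) = rest2 := by
      rw [List.drop_succ_cons (i := 1 + r1.length),
        show (1 : Nat) + r1.length = (r1 ++ [d]).length by simp [Nat.add_comm],
        show r1 ++ d :: rest2 = (r1 ++ [d]) ++ rest2 by simp,
        List.drop_left]
    rw [hdrop]
  simp only [hfold, hi, dif_pos hilt, hget, hj]
  -- both sides are c :: r1 ++ d :: (run of d's in rest2)
  have htake : (c :: (r1 ++ d :: rest2)).take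
      (1 + r1.length + 1 + (rest2.takeWhile (fun x => pvCharType x = pvCharType d)).length) =
      c :: (r1 ++ d :: rest2.takeWhile (fun x => pvCharType x = pvCharType d)) := by
    rw [show 1 + r1.length + 1 + (rest2.takeWhile (fun x => pvCharType x = pvCharType d)).length
        = (r1.length + 1 + (rest2.takeWhile (fun x => pvCharType x = pvCharType d)).length) + 1
      by omega]
    rw [List.take_succ_cons,
      show r1 ++ d :: rest2 = (r1 ++ [d]) ++ rest2 by simp,
      show r1.length + 1 + (rest2.takeWhile (fun x => pvCharType x = pvCharType d)).length
        = (r1 ++ [d]).length + (rest2.takeWhile (fun x => pvCharType x = pvCharType d)).length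
      by simp,
      List.take_length_add_append,
      ← List.prefix_iff_eq_take.mp (List.takeWhile_prefix _)]
    simp
  rw [htake, pvRuns_cons]
  simp

theorem group_by_type_spec : Claim_equal_group_by_type := by
  intro s _ hpre
  unfold Spec_group_by_type group_by_type group_by_type_alt
  rcases hl : s.toList with _ | ⟨c, rest⟩
  · rfl
  · rcases hpre with h | hany
    · rw [hl] at h; cases h
    · obtain ⟨x, hx, hne⟩ : ∃ x ∈ s.toList, pvCharType x ≠ pvCharType s.toList.headI := by
        simpa using hany
      rcases hdw : rest.dropWhile (fun x => pvCharType x = pvCharType c) with _ | ⟨d, rest2⟩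
      · -- all of s has c's type: contradicts Pre_
        exfalso
        apply hne
        rw [hl] at hx ⊢
        simp only [List.headI]
        rcases List.mem_cons.1 hx with h | h
        · subst h; rfl
        · have hall : ∀ y ∈ rest, pvCharType y = pvCharType c := by
            simpa [List.dropWhile_eq_nil_iff] using hdw
          exact hall x h
      · have hne2 : pvCharType d ≠ pvCharType c := by
          have hh := List.head_dropWhile_not
            (fun x => decide (pvCharType x = pvCharType c)) (l := rest) (by simp [hdw])
          simp only [hdw] at hh
          simpa using hh
        obtain ⟨r1, hr1⟩ : ∃ r1, r1 = rest.takeWhile (fun x => pvCharType x = pvCharType c) :=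
          ⟨_, rfl⟩
        have hsplit : rest = r1 ++ d :: rest2 := by
          conv_lhs => rw [← List.takeWhile_append_dropWhile
            (p := fun x => decide (pvCharType x = pvCharType c)) (l := rest)]
          rw [hdw, ← hr1]
        have h1 : ∀ x ∈ r1, pvCharType x = pvCharType c := by
          intro y hy
          rw [hr1] at hy
          simpa using List.mem_takeWhile_imp hy
        rw [hsplit]
        exact congrArg String.ofList (core_eq c d r1 rest2 h1 hne2)
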